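-- pv_equiv track=rewrite | github.com/Orso2p2n/rivals-workshop-assistant | rivals_workshop_assistant/injection/dependency_handling.py | _split_docs_and_gml
-- ===== SOURCE A (Python) =====
-- import typing as t
--
-- def _split_docs_and_gml(content: str) -> t.Tuple[str, str]:
--     lines = content.split("\n")
--     non_docs_found = False
--
--     doc_lines = []
--     gml_lines = []
--     for line in lines:
--         if not non_docs_found:
--             if line.lstrip().startswith("//"):
--                 line = line.split("//")[1].rstrip()
--                 if line[0] == " ":  # Remove padding from '// ' format
--                     line = line[1:]
--                 doc_lines.append(line)
--                 continue
--             else: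
--                 non_docs_found = True
--         gml_lines.append(line.rstrip())
--
--     return "\n".join(doc_lines), "\n".join(gml_lines)
-- ===== SOURCE B (Python) =====
-- import typing as t
-- from itertools import takewhile
--
-- def _split_docs_and_gml(content: str) -> t.Tuple[str, str]:
--     lines = content.split("\n")
--     split = sum(1 for _ in takewhile(lambda l: l.lstrip().startswith("//"), lines))
--
--     def doc(l):
--         s = l.split("//")[1].rstrip()
--         return s[1:] if s[0] == " " else s
--
--     return ("\n".join(doc(l) for l in lines[:split]),
--             "\n".join(l.rstrip() for l in lines[split:]))
-- ===== Notes on version B (the rewrite author's own statement) =====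
-- stated objective: simpler
-- what changed: Replaced the single flag-driven loop with boundary-then-two-passes: takeWhile finds how many leading lines are doc comments, then doc_lines and gml_lines are built by two independent comprehensions over lines[:split] and lines[split:].
-- outside the precondition, e.g. on _split_docs_and_gml('//'): A raises IndexError, B raises IndexError
import Mathlib
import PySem

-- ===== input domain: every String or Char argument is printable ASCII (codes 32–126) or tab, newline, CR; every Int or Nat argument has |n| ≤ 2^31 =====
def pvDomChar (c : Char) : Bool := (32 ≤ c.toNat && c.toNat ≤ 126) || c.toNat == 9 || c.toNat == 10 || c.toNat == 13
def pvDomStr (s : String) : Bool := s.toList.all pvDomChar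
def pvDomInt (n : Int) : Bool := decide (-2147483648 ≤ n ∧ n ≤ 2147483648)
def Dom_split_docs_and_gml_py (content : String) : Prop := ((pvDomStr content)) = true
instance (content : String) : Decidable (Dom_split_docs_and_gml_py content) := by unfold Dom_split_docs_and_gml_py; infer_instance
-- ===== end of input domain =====

-- B replaces A's single flag-driven loop by a takeWhile boundary search followed by two
-- independent map passes (objective: simpler decomposition; same asymptotic cost).

-- ===== PORT A =====
-- one step of A's for-loop over (non_docs_found, doc_lines, gml_lines)
def pvAStep (st : Bool × List String × List String) (line : String) :
    Bool × List String × List String :=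
  if st.1 = false then
    if PySem.Str.startswith (PySem.Str.lstrip line) "//" then
      -- line = line.split("//")[1].rstrip(); total form of the [1] index (in range here)
      let s := PySem.Str.rstrip (PySem.List.pyGetD ((PySem.Str.split? line "//").getD []) 1 "")
      -- line[0] == ' ' raises IndexError on empty s in Python (excluded by Pre_);
      -- the total port keeps s unchanged there
      let s := if PySem.Str.pyGet? s 0 = some ' ' then PySem.Str.slice s (some 1) none else s
      (st.1, st.2.1 ++ [s], st.2.2)
    else
      (true, st.2.1, st.2.2 ++ [PySem.Str.rstrip line])
  else
    (st.1, st.2.1, st.2.2 ++ [PySem.Str.rstrip line])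

def split_docs_and_gml_py (content : String) : String × String :=
  let lines := (PySem.Str.split? content "\n").getD []
  let st := lines.foldl pvAStep (false, [], [])
  (PySem.Str.join "\n" st.2.1, PySem.Str.join "\n" st.2.2)

-- ===== PORT B =====
def pvIsDoc (l : String) : Bool := PySem.Str.startswith (PySem.Str.lstrip l) "//"

def pvDocOf (l : String) : String :=
  let s := PySem.Str.rstrip (PySem.List.pyGetD ((PySem.Str.split? l "//").getD []) 1 "")
  if PySem.Str.pyGet? s 0 = some ' ' then PySem.Str.slice s (some 1) none else s

def split_docs_and_gml_py_alt (content : String) : String × String :=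
  let lines := (PySem.Str.split? content "\n").getD []
  let split := (lines.takeWhile pvIsDoc).length
  (PySem.Str.join "\n" ((lines.take split).map pvDocOf),
   PySem.Str.join "\n" ((lines.drop split).map PySem.Str.rstrip))

-- ===== PRECONDITION & SPEC =====
-- Pre_ excludes inputs whose leading comment lines have an empty text after '//'
-- (a bare '//' line): there Python's line[0] raises IndexError in A (and in B alike).
def Pre_split_docs_and_gml_py (content : String) : Prop :=
  ∀ l ∈ ((PySem.Str.split? content "\n").getD []).takeWhile
      (fun l => PySem.Str.startswith (PySem.Str.lstrip l) "//"),
    PySem.Str.rstrip (PySem.List.pyGetD ((PySem.Str.split? l "//").getD []) 1 "") ≠ ""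
instance (content : String) : Decidable (Pre_split_docs_and_gml_py content) := by
  unfold Pre_split_docs_and_gml_py; infer_instance

def pvWitness_split_docs_and_gml_py : String := "// a\ncode"

def Spec_split_docs_and_gml_py (content : String) (out : String × String) : Prop := out = split_docs_and_gml_py_alt content
instance (content : String) (out : String × String) : Decidable (Spec_split_docs_and_gml_py content out) := by unfold Spec_split_docs_and_gml_py; infer_instance

-- ===== CLAIM (what is proved, stated in full; the proofs are below) =====
def Claim_equal_split_docs_and_gml_py : Prop := ∀ (content : String), Dom_split_docs_and_gml_py content → Pre_split_docs_and_gml_py content → Spec_split_docs_and_gml_py content (split_docs_and_gml_py content)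

-- ===== LEMMAS AND PROOFS =====

-- once the flag is set, A's loop only appends rstripped lines to gml_lines
theorem pvFold_true (ls : List String) (docs gmls : List String) :
    ls.foldl pvAStep (true, docs, gmls) = (true, docs, gmls ++ ls.map PySem.Str.rstrip) := by
  induction ls generalizing gmls with
  | nil => simp
  | cons l ls ih =>
      simp only [List.foldl_cons, pvAStep, List.map_cons]
      simp [ih, List.append_assoc]

-- A's loop from a clear flag splits at the takeWhile boundary
theorem pvFold_false (ls : List String) (docs gmls : List String) :
    (ls.foldl pvAStep (false, docs, gmls)).2 =
      (docs ++ (ls.takeWhile pvIsDoc).map pvDocOf,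
       gmls ++ (ls.dropWhile pvIsDoc).map PySem.Str.rstrip) := by
  induction ls generalizing docs gmls with
  | nil => simp
  | cons l ls ih =>
      by_cases h : pvIsDoc l = true
      · have hstep : pvAStep (false, docs, gmls) l = (false, docs ++ [pvDocOf l], gmls) := by
          simp [pvAStep, pvIsDoc, pvDocOf] at h ⊢
          simp [h]
        simp only [List.foldl_cons, hstep, List.takeWhile_cons, List.dropWhile_cons, h,
          if_pos, List.map_cons]
        rw [ih]
        simp [List.append_assoc]
      · have hstep : pvAStep (false, docs, gmls) l =
            (true, docs, gmls ++ [PySem.Str.rstrip l]) := by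
          simp [pvAStep, pvIsDoc] at h ⊢
          simp [h]
        simp only [List.foldl_cons, hstep, List.takeWhile_cons, List.dropWhile_cons, h]
        rw [pvFold_true]
        simp [List.append_assoc]

-- taking up to the takeWhile boundary IS takeWhile
theorem pvTake_takeWhile (p : String → Bool) (ls : List String) :
    ls.take (ls.takeWhile p).length = ls.takeWhile p := by
  nth_rewrite 2 [← List.takeWhile_append_dropWhile (p := p) (l := ls)]
  rw [List.take_left]

-- dropping past the takeWhile boundary IS dropWhile
theorem pvDrop_takeWhile (p : String → Bool) (ls : List String) :
    ls.drop (ls.takeWhile p).length = ls.dropWhile p := by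
  nth_rewrite 2 [← List.takeWhile_append_dropWhile (p := p) (l := ls)]
  rw [List.drop_left]

-- ===== VERDICT (by name: the statement is the Claim_ definition above) =====
theorem split_docs_and_gml_py_spec : Claim_equal_split_docs_and_gml_py := by
  intro content _ _
  show _ = _
  unfold split_docs_and_gml_py split_docs_and_gml_py_alt
  have h := pvFold_false ((PySem.Str.split? content "\n").getD []) [] []
  simp only [h, List.nil_append]
  rw [pvTake_takeWhile, pvDrop_takeWhile]
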